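-- pv_equiv track=rewrite | github.com/JakubKozimorStudy/AI2Lab2 | venv/Include/Class.py | is_cyclone_phrase
-- ===== SOURCE A (Python) =====
-- def is_cyclone_phrase(s):
--     len = s.__len__()
--     front = 0
--     back = -1
--     tab = []
--     for x in range(len):
--         if x % 2 == 0:
--             if s[front] != " ":
--                 tab.append(s[front])
--             front += 1
--         else:
--             if s[back] != " ":
--                 tab.append(s[back])
--             back -= 1
--
--     tabSort = sorted(tab)
--     if(tabSort == tab ):
--         return "is_cyclone_phrase('" +s+"') # => True"
--     else:
--         return "is_cyclone_phrase('" +s+"') # => False"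
-- ===== SOURCE B (Python) =====
-- def is_cyclone_phrase(s):
--     # streaming check: closed-form index map, no list built, no sort
--     n = len(s)
--     ok = True
--     prev = None
--     for k in range(n):
--         i = k // 2 if k % 2 == 0 else n - 1 - k // 2
--         c = s[i]
--         if c != " ":
--             if prev is not None and c < prev:
--                 ok = False
--             prev = c
--     return "is_cyclone_phrase('" + s + "') # => " + ("True" if ok else "False")
-- ===== Notes on version B (the rewrite author's own statement) =====
-- stated objective: alternative
-- what changed: Replaces A's two-pointer list construction plus sort-and-compare with a streaming scan using a closed-form index map (k//2 or n-1-k//2): no list is materialised and no sort is done, only a running previous-character comparison in O(1) extra space; not measurably faster in CPython.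
import Mathlib
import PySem

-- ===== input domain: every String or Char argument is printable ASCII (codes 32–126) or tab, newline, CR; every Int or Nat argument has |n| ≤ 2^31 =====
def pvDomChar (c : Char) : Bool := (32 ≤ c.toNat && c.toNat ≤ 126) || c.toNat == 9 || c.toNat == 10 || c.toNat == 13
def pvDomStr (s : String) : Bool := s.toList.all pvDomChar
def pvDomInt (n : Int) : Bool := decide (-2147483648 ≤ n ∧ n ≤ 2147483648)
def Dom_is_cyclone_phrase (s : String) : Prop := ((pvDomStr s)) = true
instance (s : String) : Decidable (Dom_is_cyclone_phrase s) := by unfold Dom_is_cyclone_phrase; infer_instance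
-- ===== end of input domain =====

-- B replaces A's list construction plus sort-and-compare with a streaming scan over a
-- closed-form index map, keeping only the previous character (objective: alternative algorithm).

-- ===== PORT A =====
-- loop body of A's 'for x in range(len)': state (front, back, tab)
def aStep (cs : List Char) (st : Int × Int × List Char) (x : Int) : Int × Int × List Char :=
  if PySem.Int.mod x 2 = 0 then
    let c := (PySem.List.pyGet? cs st.1).getD ' '   -- index always in range; getD only for totality
    (st.1 + 1, st.2.1, if c ≠ ' ' then st.2.2 ++ [c] else st.2.2)
  else
    let c := (PySem.List.pyGet? cs st.2.1).getD ' '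
    (st.1, st.2.1 - 1, if c ≠ ' ' then st.2.2 ++ [c] else st.2.2)

def is_cyclone_phrase (s : String) : String :=
  let cs := s.toList
  let len : Int := PySem.Str.len s
  let st := (PySem.List.pyRange 0 len 1).foldl (aStep cs) (0, -1, [])
  let tab := st.2.2
  let tabSort := PySem.List.sorted tab (fun c => c) false
  if tabSort = tab then
    String.ofList ("is_cyclone_phrase('".toList ++ cs ++ "') # => True".toList)
  else
    String.ofList ("is_cyclone_phrase('".toList ++ cs ++ "') # => False".toList)

-- ===== PORT B =====
-- B's loop body: state (prev, ok); the traversal index is computed in closed form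
def procc (c : Char) (st : Option Char × Bool) : Option Char × Bool :=
  if c ≠ ' ' then
    (some c, if (match st.1 with | some p => decide (c < p) | none => false) then false else st.2)
  else st

def bStep (cs : List Char) (n : Int) (st : Option Char × Bool) (k : Int) : Option Char × Bool :=
  let i := if PySem.Int.mod k 2 = 0 then PySem.Int.floordiv k 2 else n - 1 - PySem.Int.floordiv k 2
  procc ((PySem.List.pyGet? cs i).getD ' ') st   -- index always in range; getD only for totality

def is_cyclone_phrase_alt (s : String) : String :=
  let cs := s.toList
  let n : Int := PySem.Str.len s
  let st := (PySem.List.pyRange 0 n 1).foldl (bStep cs n) (none, true)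
  String.ofList ("is_cyclone_phrase('".toList ++ cs ++
    ("') # => ".toList ++ (if st.2 then "True".toList else "False".toList)))

-- ===== PRECONDITION & SPEC =====
def Spec_is_cyclone_phrase (s : String) (out : String) : Prop := out = is_cyclone_phrase_alt s
instance (s : String) (out : String) : Decidable (Spec_is_cyclone_phrase s out) := by unfold Spec_is_cyclone_phrase; infer_instance

-- ===== CLAIM (what is proved, stated in full; the proofs are below) =====
def Claim_equal_is_cyclone_phrase : Prop := ∀ (s : String), Dom_is_cyclone_phrase s → Spec_is_cyclone_phrase s (is_cyclone_phrase s)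

-- ===== LEMMAS AND PROOFS =====

-- proof-only helper: the cyclone traversal sequence, as a two-pointer recursion
def cycloneTab (cs : List Char) (lo hi : Int) : List Char :=
  if lo < hi then
    (let c := (PySem.List.pyGet? cs lo).getD ' '; if c ≠ ' ' then [c] else []) ++
    (let c := (PySem.List.pyGet? cs hi).getD ' '; if c ≠ ' ' then [c] else []) ++
    cycloneTab cs (lo + 1) (hi - 1)
  else if lo = hi then
    (let c := (PySem.List.pyGet? cs lo).getD ' '; if c ≠ ' ' then [c] else [])
  else []
termination_by (hi + 1 - lo).toNat
decreasing_by omega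

-- proof-only helper: the adjacent-pairs non-decreasing check
def zipall (l : List Char) : Bool := (l.zip l.tail).all (fun p => decide (p.1 ≤ p.2))

-- A's loop, started with an even number 2*a of steps already done, produces the cyclone segment
lemma loop_eq (cs : List Char) (m : Nat) : ∀ (a : Nat) (tab : List Char),
    2 * a + m = cs.length →
    ((PySem.List.pyRange (2 * (a : Int)) (2 * (a : Int) + (m : Int)) 1).foldl (aStep cs)
        ((a : Int), -((a : Int) + 1), tab)).2.2
      = tab ++ cycloneTab cs (a : Int) ((cs.length : Int) - 1 - (a : Int)) := by
  induction m using Nat.twoStepInduction with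
  | zero =>
    intro a tab h
    have hr : PySem.List.pyRange (2 * (a : Int)) (2 * (a : Int) + 0) 1 = [] := by
      simp [PySem.List.pyRange]
    simp only [Nat.cast_zero]
    rw [hr]
    rw [cycloneTab]
    have h1 : ¬ ((a : Int) < (cs.length : Int) - 1 - a) := by omega
    have h2 : ¬ ((a : Int) = (cs.length : Int) - 1 - a) := by omega
    simp [h1, h2]
  | one =>
    intro a tab h
    have hr : PySem.List.pyRange (2 * (a : Int)) (2 * (a : Int) + 1) 1 =
        [2 * (a : Int)] := by
      rw [PySem.List.pyRange_one_cons (by omega)]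
      simp [PySem.List.pyRange]
    simp only [Nat.cast_one]
    rw [hr]
    have hm : PySem.Int.mod (2 * (a : Int)) 2 = 0 := by
      rw [PySem.Int.mod_eq_emod_of_pos (by norm_num)]; omega
    have hhi : (cs.length : Int) - 1 - a = (a : Int) := by omega
    rw [cycloneTab, hhi]
    by_cases hsp : cs[a]?.getD ' ' = ' ' <;>
      simp [aStep, hsp, PySem.List.pyGet?_natCast]
  | more m ih _ =>
    intro a tab h
    have hr : PySem.List.pyRange (2 * (a : Int)) (2 * (a : Int) + ((m + 2 : Nat) : Int)) 1 =
        2 * (a : Int) :: (2 * (a : Int) + 1) ::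
          PySem.List.pyRange (2 * ((a : Int) + 1)) (2 * ((a : Int) + 1) + (m : Int)) 1 := by
      rw [PySem.List.pyRange_one_cons (by push_cast; omega)]
      rw [PySem.List.pyRange_one_cons (by push_cast; omega)]
      norm_num
      congr 1 <;> ring
    rw [hr]
    have hme : PySem.Int.mod (2 * (a : Int)) 2 = 0 := by
      rw [PySem.Int.mod_eq_emod_of_pos (by norm_num)]; omega
    have hmo : ¬ PySem.Int.mod (2 * (a : Int) + 1) 2 = 0 := by
      rw [PySem.Int.mod_eq_emod_of_pos (by norm_num)]; omega
    simp only [List.foldl_cons, aStep, hme, hmo, if_pos, if_neg, not_false_iff]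
    have e1 : (-((a : Int) + 1) - 1) = -(((a + 1 : Nat) : Int) + 1) := by push_cast; ring
    have e2 : ((a : Int) + 1) = ((a + 1 : Nat) : Int) := by push_cast; ring
    rw [e1, e2, ih (a + 1) _ (by omega)]
    -- convert the negative back-index into a forward one
    have hneg : PySem.List.pyGet? cs (-((a + 1 : Nat) : Int)) = cs[cs.length - 1 - a]? := by
      rw [PySem.List.pyGet?_neg_natCast (xs := cs) (k := a + 1) (by omega) (by omega)]
      congr 1
      omega
    conv_rhs => rw [cycloneTab]
    have hlt : ((a : Int) < (cs.length : Int) - 1 - (a : Int)) := by omega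
    rw [if_pos hlt]
    have hhi : ((cs.length : Int) - 1 - (a : Int)) = ((cs.length - 1 - a : Nat) : Int) := by
      omega
    have hpos : PySem.List.pyGet? cs ((cs.length : Int) - 1 - (a : Int)) = cs[cs.length - 1 - a]? := by
      rw [hhi, PySem.List.pyGet?_natCast]
    have hrec : ((cs.length : Int) - 1 - (a : Int) - 1) = ((cs.length : Int) - 1 - ((a + 1 : Nat) : Int)) := by
      push_cast; ring
    rw [hneg, hpos, hrec]
    by_cases h1 : cs[(a : Nat)]?.getD ' ' = ' ' <;>
      by_cases h2 : (cs[cs.length - 1 - a]?).getD ' ' = ' ' <;>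
        simp [h1, h2, PySem.List.pyGet?_natCast]

lemma zipall_append (tab : List Char) (c : Char) :
    zipall (tab ++ [c]) =
      (zipall tab && (match tab.getLast? with | none => true | some p => decide (p ≤ c))) := by
  induction tab with
  | nil => simp [zipall]
  | cons a t ih =>
    cases t with
    | nil => simp [zipall]
    | cons b t' =>
      simp only [zipall, List.cons_append, List.tail_cons, List.zip_cons_cons, List.all_cons,
        List.getLast?_cons_cons] at *
      rw [ih]
      simp [Bool.and_assoc]

-- one streaming step preserves the invariant (prev = last, ok = chain so far)
lemma proc_inv (tab : List Char) (c : Char) :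
    procc c (tab.getLast?, zipall tab)
      = ((tab ++ if c ≠ ' ' then [c] else []).getLast?,
         zipall (tab ++ if c ≠ ' ' then [c] else [])) := by
  by_cases hc : c = ' '
  · simp [procc, hc]
  · simp only [procc, hc, ne_eq, not_false_iff, if_pos]
    rw [zipall_append]
    cases h : tab.getLast? with
    | none => simp
    | some p =>
      by_cases hpc : c < p
      · simp [hpc, not_le.mpr hpc]
      · simp [hpc, not_lt.mp hpc]

-- B's loop, started after 2*a steps, computes last/chain of the remaining cyclone segment
lemma loopB (cs : List Char) (m : Nat) : ∀ (a : Nat) (tab : List Char),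
    2 * a + m = cs.length →
    (PySem.List.pyRange (2 * (a : Int)) (2 * (a : Int) + (m : Int)) 1).foldl
        (bStep cs (cs.length : Int)) (tab.getLast?, zipall tab)
      = ((tab ++ cycloneTab cs (a : Int) ((cs.length : Int) - 1 - (a : Int))).getLast?,
         zipall (tab ++ cycloneTab cs (a : Int) ((cs.length : Int) - 1 - (a : Int)))) := by
  induction m using Nat.twoStepInduction with
  | zero =>
    intro a tab h
    have hr : PySem.List.pyRange (2 * (a : Int)) (2 * (a : Int) + 0) 1 = [] := by
      simp [PySem.List.pyRange]
    simp only [Nat.cast_zero]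
    rw [hr]
    rw [cycloneTab]
    have h1 : ¬ ((a : Int) < (cs.length : Int) - 1 - a) := by omega
    have h2 : ¬ ((a : Int) = (cs.length : Int) - 1 - a) := by omega
    simp [h1, h2]
  | one =>
    intro a tab h
    have hr : PySem.List.pyRange (2 * (a : Int)) (2 * (a : Int) + 1) 1 =
        [2 * (a : Int)] := by
      rw [PySem.List.pyRange_one_cons (by omega)]
      simp [PySem.List.pyRange]
    simp only [Nat.cast_one]
    rw [hr]
    have hm : PySem.Int.mod (2 * (a : Int)) 2 = 0 := by
      rw [PySem.Int.mod_eq_emod_of_pos (by norm_num)]; omega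
    have hd : PySem.Int.floordiv (2 * (a : Int)) 2 = (a : Int) := by
      rw [PySem.Int.floordiv_eq_ediv_of_pos (by norm_num)]; omega
    have hhi : (cs.length : Int) - 1 - a = (a : Int) := by omega
    rw [cycloneTab, hhi]
    simp only [List.foldl_cons, List.foldl_nil, bStep, hm, if_pos, hd]
    have h1 : ¬ ((a : Int) < (a : Int)) := by omega
    rw [if_neg h1]
    exact proc_inv _ _
  | more m ih _ =>
    intro a tab h
    have hr : PySem.List.pyRange (2 * (a : Int)) (2 * (a : Int) + ((m + 2 : Nat) : Int)) 1 =
        2 * (a : Int) :: (2 * (a : Int) + 1) ::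
          PySem.List.pyRange (2 * ((a : Int) + 1)) (2 * ((a : Int) + 1) + (m : Int)) 1 := by
      rw [PySem.List.pyRange_one_cons (by push_cast; omega)]
      rw [PySem.List.pyRange_one_cons (by push_cast; omega)]
      norm_num
      congr 1 <;> ring
    rw [hr]
    have hme : PySem.Int.mod (2 * (a : Int)) 2 = 0 := by
      rw [PySem.Int.mod_eq_emod_of_pos (by norm_num)]; omega
    have hmo : ¬ PySem.Int.mod (2 * (a : Int) + 1) 2 = 0 := by
      rw [PySem.Int.mod_eq_emod_of_pos (by norm_num)]; omega
    have hde : PySem.Int.floordiv (2 * (a : Int)) 2 = (a : Int) := by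
      rw [PySem.Int.floordiv_eq_ediv_of_pos (by norm_num)]; omega
    have hdo : PySem.Int.floordiv (2 * (a : Int) + 1) 2 = (a : Int) := by
      rw [PySem.Int.floordiv_eq_ediv_of_pos (by norm_num)]; omega
    simp only [List.foldl_cons, bStep, hme, hmo, if_pos, if_neg, not_false_iff, hde, hdo]
    rw [proc_inv]
    set c2 := (PySem.List.pyGet? cs ((cs.length : Int) - 1 - (a : Int))).getD ' ' with hc2
    set tab1 := tab ++ if (PySem.List.pyGet? cs (a : Int)).getD ' ' ≠ ' '
        then [(PySem.List.pyGet? cs (a : Int)).getD ' '] else [] with htab1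
    rw [proc_inv tab1 c2]
    have e2 : (2 * (a : Int) + 2) = 2 * ((a + 1 : Nat) : Int) := by push_cast; ring
    have e3 : 2 * ((a : Int) + 1) = 2 * ((a + 1 : Nat) : Int) := by push_cast; ring
    rw [e3, ih (a + 1) _ (by omega)]
    conv_rhs => rw [cycloneTab]
    have hlt : ((a : Int) < (cs.length : Int) - 1 - (a : Int)) := by omega
    rw [if_pos hlt]
    have hrec : ((cs.length : Int) - 1 - (a : Int) - 1) = ((cs.length : Int) - 1 - ((a + 1 : Nat) : Int)) := by
      push_cast; ring
    have ha1 : ((a : Int) + 1) = ((a + 1 : Nat) : Int) := by push_cast; ring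
    rw [hrec, ha1]
    simp [htab1, hc2, List.append_assoc]

lemma zip_all_iff_chain (l : List Char) :
    (zipall l = true) ↔ List.IsChain (· ≤ ·) l := by
  induction l with
  | nil => simp [zipall]
  | cons a t ih =>
    cases t with
    | nil => simp [zipall]
    | cons b t' =>
      simp only [zipall, List.tail_cons, List.zip_cons_cons, List.all_cons, Bool.and_eq_true,
        decide_eq_true_eq, List.isChain_cons_cons] at *
      rw [← ih]

lemma sorted_eq_iff (tab : List Char) :
    (PySem.List.sorted tab (fun c => c) false = tab) ↔ (zipall tab = true) := by
  rw [zip_all_iff_chain]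
  constructor
  · intro h
    have hp := PySem.List.sorted_pairwise (xs := tab) (key := fun c => c)
    rw [h] at hp
    exact hp.isChain
  · intro h
    exact PySem.List.sorted_eq_self_of_pairwise (h := h.pairwise)

-- ===== VERDICT (by name: the statement is the Claim_ definition above) =====
theorem is_cyclone_phrase_spec : Claim_equal_is_cyclone_phrase := by
  intro s _
  unfold Spec_is_cyclone_phrase is_cyclone_phrase is_cyclone_phrase_alt
  have hA := loop_eq s.toList s.toList.length 0 [] (by omega)
  have hB := loopB s.toList s.toList.length 0 [] (by omega)
  simp only [Nat.cast_zero, mul_zero, zero_add, List.nil_append, List.getLast?_nil] at hA hB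
  have hz : zipall [] = true := by simp [zipall]
  rw [hz] at hB
  simp only [PySem.Str.len_eq, hA, hB]
  set tab := cycloneTab s.toList 0 ((s.toList.length : Int) - 1 - 0) with htab
  by_cases h : PySem.List.sorted tab (fun c => c) false = tab
  · rw [if_pos h]
    have : zipall tab = true := by
      rw [← sorted_eq_iff]
      simpa using h
    rw [this]
    simp
  · rw [if_neg h]
    have : ¬ (zipall tab = true) := fun hc => h (by simpa using (sorted_eq_iff tab).mpr hc)
    rw [Bool.not_eq_true] at this
    rw [this]
    simp
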